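-- pv_equiv track=rewrite | github.com/mberjans/smo_chatbot_August_6th_2025 | tests/integration/test_performance_cache_integration.py | _group_similar_queries
-- ===== SOURCE A (Python) =====
-- from typing import Dict, Any, List, Optional, Tuple, Set
--
-- def _group_similar_queries(queries: List[str]) -> List[List[str]]:
--     """Group similar queries for batch optimization."""
--     groups = []
--
--     # Simple similarity grouping based on common keywords
--     biomedical_categories = {
--         'metabolite': [],
--         'pathway': [],
--         'biomarker': [],
--         'clinical': [],
--         'other': []
--     }
--
--     for query in queries:
--         query_lower = query.lower()
--         categorized = False
--
--         for category in biomedical_categories: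
--             if category in query_lower:
--                 biomedical_categories[category].append(query)
--                 categorized = True
--                 break
--
--         if not categorized:
--             biomedical_categories['other'].append(query)
--
--     # Convert to groups, filtering empty categories
--     for category, category_queries in biomedical_categories.items():
--         if category_queries:
--             groups.append(category_queries)
--
--     return groups if groups else [queries]  # Fallback to single group
-- ===== SOURCE B (Python) =====
-- def _group_similar_queries(queries):
--     """Group similar queries for batch optimization (category-outer decomposition)."""
--     cats = ['metabolite', 'pathway', 'biomarker', 'clinical', 'other']
--
--     def classify(q):
--         ql = q.lower()
--         for c in cats:
--             if c in ql:
--                 return c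
--         return 'other'
--
--     groups = [[q for q in queries if classify(q) == cat] for cat in cats]
--     groups = [g for g in groups if g]
--     return groups if groups else [queries]
-- ===== Notes on version B (the rewrite author's own statement) =====
-- stated objective: simpler
-- what changed: Inverted the loop nesting: a classify(q) helper picks each query's first matching category, and buckets are built per category with a comprehension, replacing A's single pass that mutates five accumulator lists with an inner break.
import Mathlib
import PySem

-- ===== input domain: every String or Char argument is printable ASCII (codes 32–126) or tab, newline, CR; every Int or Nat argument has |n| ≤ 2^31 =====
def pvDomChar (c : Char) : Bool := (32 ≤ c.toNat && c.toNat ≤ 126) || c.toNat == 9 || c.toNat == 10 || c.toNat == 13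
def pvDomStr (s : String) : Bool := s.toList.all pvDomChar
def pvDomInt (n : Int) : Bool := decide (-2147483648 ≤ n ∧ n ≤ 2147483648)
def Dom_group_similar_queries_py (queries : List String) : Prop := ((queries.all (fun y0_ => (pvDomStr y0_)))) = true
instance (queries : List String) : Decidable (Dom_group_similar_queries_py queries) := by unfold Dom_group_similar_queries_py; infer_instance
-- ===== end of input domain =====

-- B inverts A's loop nesting (category-outer buckets via a classify helper) for a simpler decomposition; same values everywhere.

-- ===== PORT A =====
-- state: the five category lists (metabolite, pathway, biomarker, clinical, other), in dict insertion order
def pvStepA (st : List String × List String × List String × List String × List String)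
    (query : String) : List String × List String × List String × List String × List String :=
  let ql := PySem.Str.lower query
  let (m, p, b, c, o) := st
  -- inner 'for category in biomedical_categories: if category in query_lower: append; break'
  if PySem.Str.isIn "metabolite" ql then (m ++ [query], p, b, c, o)
  else if PySem.Str.isIn "pathway" ql then (m, p ++ [query], b, c, o)
  else if PySem.Str.isIn "biomarker" ql then (m, p, b ++ [query], c, o)
  else if PySem.Str.isIn "clinical" ql then (m, p, b, c ++ [query], o)
  else if PySem.Str.isIn "other" ql then (m, p, b, c, o ++ [query])
  -- 'if not categorized: append to other'
  else (m, p, b, c, o ++ [query])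

def group_similar_queries_py (queries : List String) : List (List String) :=
  let st := queries.foldl pvStepA ([], [], [], [], [])
  let (m, p, b, c, o) := st
  -- 'for category, category_queries in items(): if category_queries: groups.append(category_queries)'
  let groups := [m, p, b, c, o].foldl (fun g qs => if qs ≠ [] then g ++ [qs] else g) []
  if groups = [] then [queries] else groups

-- ===== PORT B =====
def pvClassify (q : String) : String :=
  let ql := PySem.Str.lower q
  match ["metabolite", "pathway", "biomarker", "clinical", "other"].find?
      (fun c => PySem.Str.isIn c ql) with
  | some c => c
  | none => "other"

def group_similar_queries_py_alt (queries : List String) : List (List String) :=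
  let cats := ["metabolite", "pathway", "biomarker", "clinical", "other"]
  let groups := (cats.map (fun cat => queries.filter (fun q => pvClassify q == cat))).filter
      (fun g => g ≠ [])
  if groups = [] then [queries] else groups

-- ===== PRECONDITION & SPEC =====
def Spec_group_similar_queries_py (queries : List String) (out : List (List String)) : Prop := out = group_similar_queries_py_alt queries
instance (queries : List String) (out : List (List String)) : Decidable (Spec_group_similar_queries_py queries out) := by unfold Spec_group_similar_queries_py; infer_instance

-- ===== CLAIM (what is proved, stated in full; the proofs are below) =====
def Claim_equal_group_similar_queries_py : Prop := ∀ (queries : List String), Dom_group_similar_queries_py queries → Spec_group_similar_queries_py queries (group_similar_queries_py queries)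

-- ===== LEMMAS AND PROOFS =====

def pvIsM (q : String) : Bool := PySem.Str.isIn "metabolite" (PySem.Str.lower q)
def pvIsP (q : String) : Bool := PySem.Str.isIn "pathway" (PySem.Str.lower q)
def pvIsB (q : String) : Bool := PySem.Str.isIn "biomarker" (PySem.Str.lower q)
def pvIsC (q : String) : Bool := PySem.Str.isIn "clinical" (PySem.Str.lower q)

-- A's fold accumulates exactly the first-match filters onto each component
theorem pvFoldA_eq (qs : List String) (m p b c o : List String) :
    qs.foldl pvStepA (m, p, b, c, o) =
      (m ++ qs.filter (fun q => pvIsM q),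
       p ++ qs.filter (fun q => !pvIsM q && pvIsP q),
       b ++ qs.filter (fun q => !pvIsM q && !pvIsP q && pvIsB q),
       c ++ qs.filter (fun q => !pvIsM q && !pvIsP q && !pvIsB q && pvIsC q),
       o ++ qs.filter (fun q => !pvIsM q && !pvIsP q && !pvIsB q && !pvIsC q)) := by
  induction qs generalizing m p b c o with
  | nil => simp
  | cons q qs ih =>
    simp only [List.foldl_cons, pvStepA, List.filter_cons]
    cases hM : pvIsM q <;> cases hP : pvIsP q <;> cases hB : pvIsB q <;> cases hC : pvIsC q <;>
      cases hO : PySem.Str.isIn "other" (PySem.Str.lower q) <;>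
        simp_all [pvIsM, pvIsP, pvIsB, pvIsC, List.append_assoc]

theorem pvClassify_M (q : String) :
    (pvClassify q == "metabolite") = (pvIsM q) := by
  simp only [pvClassify, pvIsM, List.find?]
  cases h1 : PySem.Str.isIn "metabolite" (PySem.Str.lower q) <;>
  cases h2 : PySem.Str.isIn "pathway" (PySem.Str.lower q) <;>
  cases h3 : PySem.Str.isIn "biomarker" (PySem.Str.lower q) <;>
  cases h4 : PySem.Str.isIn "clinical" (PySem.Str.lower q) <;>
  cases h5 : PySem.Str.isIn "other" (PySem.Str.lower q) <;>
  simp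

theorem pvClassify_P (q : String) :
    (pvClassify q == "pathway") = (!pvIsM q && pvIsP q) := by
  simp only [pvClassify, pvIsM, pvIsP, List.find?]
  cases h1 : PySem.Str.isIn "metabolite" (PySem.Str.lower q) <;>
  cases h2 : PySem.Str.isIn "pathway" (PySem.Str.lower q) <;>
  cases h3 : PySem.Str.isIn "biomarker" (PySem.Str.lower q) <;>
  cases h4 : PySem.Str.isIn "clinical" (PySem.Str.lower q) <;>
  cases h5 : PySem.Str.isIn "other" (PySem.Str.lower q) <;>
  simp

theorem pvClassify_B (q : String) :
    (pvClassify q == "biomarker") = (!pvIsM q && !pvIsP q && pvIsB q) := by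
  simp only [pvClassify, pvIsM, pvIsP, pvIsB, List.find?]
  cases h1 : PySem.Str.isIn "metabolite" (PySem.Str.lower q) <;>
  cases h2 : PySem.Str.isIn "pathway" (PySem.Str.lower q) <;>
  cases h3 : PySem.Str.isIn "biomarker" (PySem.Str.lower q) <;>
  cases h4 : PySem.Str.isIn "clinical" (PySem.Str.lower q) <;>
  cases h5 : PySem.Str.isIn "other" (PySem.Str.lower q) <;>
  simp

theorem pvClassify_C (q : String) :
    (pvClassify q == "clinical") = (!pvIsM q && !pvIsP q && !pvIsB q && pvIsC q) := by
  simp only [pvClassify, pvIsM, pvIsP, pvIsB, pvIsC, List.find?]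
  cases h1 : PySem.Str.isIn "metabolite" (PySem.Str.lower q) <;>
  cases h2 : PySem.Str.isIn "pathway" (PySem.Str.lower q) <;>
  cases h3 : PySem.Str.isIn "biomarker" (PySem.Str.lower q) <;>
  cases h4 : PySem.Str.isIn "clinical" (PySem.Str.lower q) <;>
  cases h5 : PySem.Str.isIn "other" (PySem.Str.lower q) <;>
  simp

theorem pvClassify_O (q : String) :
    (pvClassify q == "other") = (!pvIsM q && !pvIsP q && !pvIsB q && !pvIsC q) := by
  simp only [pvClassify, pvIsM, pvIsP, pvIsB, pvIsC, List.find?]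
  cases h1 : PySem.Str.isIn "metabolite" (PySem.Str.lower q) <;>
  cases h2 : PySem.Str.isIn "pathway" (PySem.Str.lower q) <;>
  cases h3 : PySem.Str.isIn "biomarker" (PySem.Str.lower q) <;>
  cases h4 : PySem.Str.isIn "clinical" (PySem.Str.lower q) <;>
  cases h5 : PySem.Str.isIn "other" (PySem.Str.lower q) <;>
  simp

-- ===== VERDICT (by name: the statement is the Claim_ definition above) =====
theorem group_similar_queries_py_spec : Claim_equal_group_similar_queries_py := by
  intro queries _
  show group_similar_queries_py queries = group_similar_queries_py_alt queries
  unfold group_similar_queries_py group_similar_queries_py_alt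
  rw [pvFoldA_eq]
  simp only [List.map_cons, List.map_nil]
  rw [List.filter_congr (fun q _ => pvClassify_M q),
      List.filter_congr (fun q _ => pvClassify_P q),
      List.filter_congr (fun q _ => pvClassify_B q),
      List.filter_congr (fun q _ => pvClassify_C q),
      List.filter_congr (fun q _ => pvClassify_O q)]
  simp only [List.nil_append]
  generalize queries.filter (fun q => pvIsM q) = g1
  generalize queries.filter (fun q => !pvIsM q && pvIsP q) = g2
  generalize queries.filter (fun q => !pvIsM q && !pvIsP q && pvIsB q) = g3
  generalize queries.filter (fun q => !pvIsM q && !pvIsP q && !pvIsB q && pvIsC q) = g4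
  generalize queries.filter (fun q => !pvIsM q && !pvIsP q && !pvIsB q && !pvIsC q) = g5
  by_cases h1 : g1 = [] <;> by_cases h2 : g2 = [] <;> by_cases h3 : g3 = [] <;>
    by_cases h4 : g4 = [] <;> by_cases h5 : g5 = [] <;>
      simp [h1, h2, h3, h4, h5]
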